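-- pv_equiv track=rewrite | github.com/raeez/chiral-bar-cobar | compute/lib/theorem_categorical_zeta_higher_engine.py | dirichlet_coefficients_sl3
-- ===== SOURCE A (Python) =====
-- from typing import Dict, List, Optional, Tuple
--
-- def weyl_dim_sl3(a: int, b: int) -> int:
--     """dim V(a,b) = (a+1)(b+1)(a+b+2)/2 for sl_3.
--
--     Three positive roots of A_2 give three factors in the Weyl product.
--     """
--     if a < 0 or b < 0:
--         return 0
--     return (a + 1) * (b + 1) * (a + b + 2) // 2
--
-- def dirichlet_coefficients_sl3(max_dim: int, max_total: int = 200):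
--     """a_d = number of sl_3 irreps of dimension d, for d <= max_dim.
--
--     For sl_3: a_3 = 2 (fundamental + antifundamental), a_8 = 1 (adjoint),
--     a_15 = 4, etc.  Dimensions d that are not realised have a_d = 0.
--     """
--     coeffs: Dict[int, int] = {}
--     coeffs[1] = 1  # trivial
--     for t in range(1, max_total + 1):
--         any_in_range = False
--         for a in range(t + 1):
--             b = t - a
--             d = weyl_dim_sl3(a, b)
--             if d <= max_dim:
--                 coeffs[d] = coeffs.get(d, 0) + 1
--                 any_in_range = True
--         # Early exit when minimum dim at this total exceeds bound
--         min_d = weyl_dim_sl3(t, 0)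
--         if min_d > max_dim and not any_in_range:
--             break
--     return coeffs
-- ===== SOURCE B (Python) =====
-- def dirichlet_coefficients_sl3(max_dim, max_total=200):
--     """a_d = number of sl_3 irreps of dimension d, for d <= max_dim.
--
--     Per total t only the two end-intervals of highest weights a can satisfy
--     dim <= max_dim (the product (a+1)(t+1-a) is unimodal in a), so find the
--     prefix length L by scanning until the bound fails and visit only the
--     valid pairs, instead of testing every a in 0..t.
--     """
--     coeffs = {1: 1}
--     t = 1
--     while t <= max_total and (t + 1) * (t + 2) // 2 <= max_dim:
--         # (a+1)(t+1-a)(t+2)//2 <= max_dim  <=>  (a+1)(t+1-a) <= M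
--         M = (2 * max_dim + 1) // (t + 2)
--         half = (t + 2) // 2
--         L = 0
--         while L < half and (L + 1) * (t + 1 - L) <= M:
--             L += 1
--         for a in range(L):
--             d = (a + 1) * (t + 1 - a) * (t + 2) // 2
--             coeffs[d] = coeffs.get(d, 0) + 1
--         for a in range(max(L, t + 1 - L), t + 1):
--             d = (a + 1) * (t + 1 - a) * (t + 2) // 2
--             coeffs[d] = coeffs.get(d, 0) + 1
--         t += 1
--     return coeffs
-- ===== Notes on version B (the rewrite author's own statement) =====
-- stated objective: faster
-- what changed: Instead of testing every highest weight a in 0..t per total t, B uses unimodality of (a+1)(t+1-a) to find the valid prefix length L and visits only the two end-intervals [0,L) and [max(L,t+1-L),t] of valid a, replacing A's break-flag outer loop by a while with the closed-form continuation condition.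
import Mathlib
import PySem

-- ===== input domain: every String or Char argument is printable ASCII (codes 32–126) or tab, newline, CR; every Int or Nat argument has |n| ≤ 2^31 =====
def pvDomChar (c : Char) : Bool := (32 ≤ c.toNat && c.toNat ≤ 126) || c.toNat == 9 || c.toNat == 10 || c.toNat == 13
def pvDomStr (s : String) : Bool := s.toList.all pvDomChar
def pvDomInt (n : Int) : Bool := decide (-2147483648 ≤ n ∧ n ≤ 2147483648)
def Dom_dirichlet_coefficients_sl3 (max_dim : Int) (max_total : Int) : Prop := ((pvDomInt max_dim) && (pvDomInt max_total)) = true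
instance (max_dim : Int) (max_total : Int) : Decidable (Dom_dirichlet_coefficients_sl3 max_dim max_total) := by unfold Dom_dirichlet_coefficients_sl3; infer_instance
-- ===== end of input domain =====

-- B enumerates, per total t, only the two end-intervals of valid highest weights a
-- (unimodality of (a+1)(t+1-a)) instead of testing every a in 0..t: faster.

-- ===== PORT A =====
def weyl_dim_sl3 (a : Int) (b : Int) : Int :=
  if a < 0 ∨ b < 0 then 0
  else PySem.Int.floordiv ((a + 1) * (b + 1) * (a + b + 2)) 2

def pvAInner (max_dim t : Int) (st : PySem.Dict Int Int × Bool) (a : Int) :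
    PySem.Dict Int Int × Bool :=
  let b := t - a
  let d := weyl_dim_sl3 a b
  if d ≤ max_dim then (st.1.insert d (st.1.getD d 0 + 1), true) else st

-- 'for t in range(1, max_total + 1)' with 'break', kept lazy in t (range is not materialised)
def pvALoop (max_dim max_total t : Int) (coeffs : PySem.Dict Int Int) : PySem.Dict Int Int :=
  if t ≤ max_total then
    let st := (PySem.List.pyRange 0 (t + 1) 1).foldl (pvAInner max_dim t) (coeffs, false)
    let min_d := weyl_dim_sl3 t 0
    if min_d > max_dim ∧ st.2 = false then st.1 else pvALoop max_dim max_total (t + 1) st.1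
  else coeffs
termination_by (max_total + 1 - t).toNat
decreasing_by omega

def dirichlet_coefficients_sl3 (max_dim : Int) (max_total : Int) : List (Int × Int) :=
  (pvALoop max_dim max_total 1
      ((PySem.Dict.empty : PySem.Dict Int Int).insert 1 1)).items

-- ===== PORT B =====
def pvBFindL (t M half L : Int) : Int :=
  if h : L < half ∧ (L + 1) * (t + 1 - L) ≤ M then pvBFindL t M half (L + 1) else L
termination_by (half - L).toNat
decreasing_by omega

def pvBStep (t : Int) (coeffs : PySem.Dict Int Int) (a : Int) : PySem.Dict Int Int :=
  let d := PySem.Int.floordiv ((a + 1) * (t + 1 - a) * (t + 2)) 2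
  coeffs.insert d (coeffs.getD d 0 + 1)

def pvBLoop (max_dim max_total t : Int) (coeffs : PySem.Dict Int Int) : PySem.Dict Int Int :=
  if t ≤ max_total ∧ PySem.Int.floordiv ((t + 1) * (t + 2)) 2 ≤ max_dim then
    let M := PySem.Int.floordiv (2 * max_dim + 1) (t + 2)
    let half := PySem.Int.floordiv (t + 2) 2
    let L := pvBFindL t M half 0
    let coeffs1 := (PySem.List.pyRange 0 L 1).foldl (pvBStep t) coeffs
    let coeffs2 := (PySem.List.pyRange (max L (t + 1 - L)) (t + 1) 1).foldl (pvBStep t) coeffs1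
    pvBLoop max_dim max_total (t + 1) coeffs2
  else coeffs
termination_by (max_total + 1 - t).toNat
decreasing_by omega

def dirichlet_coefficients_sl3_alt (max_dim : Int) (max_total : Int) : List (Int × Int) :=
  (pvBLoop max_dim max_total 1 ((PySem.Dict.empty : PySem.Dict Int Int).insert 1 1)).items

-- ===== PRECONDITION & SPEC =====
def Spec_dirichlet_coefficients_sl3 (max_dim : Int) (max_total : Int) (out : List (Int × Int)) : Prop := out = dirichlet_coefficients_sl3_alt max_dim max_total
instance (max_dim : Int) (max_total : Int) (out : List (Int × Int)) : Decidable (Spec_dirichlet_coefficients_sl3 max_dim max_total out) := by unfold Spec_dirichlet_coefficients_sl3; infer_instance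

-- ===== CLAIM (what is proved, stated in full; the proofs are below) =====
def Claim_equal_dirichlet_coefficients_sl3 : Prop := ∀ (max_dim : Int) (max_total : Int), Dom_dirichlet_coefficients_sl3 max_dim max_total → Spec_dirichlet_coefficients_sl3 max_dim max_total (dirichlet_coefficients_sl3 max_dim max_total)

-- ===== LEMMAS AND PROOFS =====

-- the product (a+1)(t+1-a), as a function of x = a+1: f x = x*(t+2-x); monotone on [1, (t+2)/2]
theorem pv_f_mono (t x y : Int) (_h1 : 1 ≤ x) (_h2 : x ≤ y) (_h3 : x + y ≤ t + 2) :
    x * (t + 2 - x) ≤ y * (t + 2 - y) := by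
  nlinarith [mul_nonneg (by omega : (0:Int) ≤ y - x) (by omega : (0:Int) ≤ t + 2 - x - y)]

-- minimum of the product over 0 ≤ a ≤ t is t+1 (at the endpoints)
theorem pv_f_min (t a : Int) (ha : 0 ≤ a) (hat : a ≤ t) :
    t + 1 ≤ (a + 1) * (t + 1 - a) := by
  nlinarith [mul_nonneg ha (by omega : (0:Int) ≤ t - a)]

-- inside the range the guard of weyl_dim_sl3 is off and the product factors
theorem pv_weyl_eq (t a : Int) (ha : 0 ≤ a) (hat : a ≤ t) :
    weyl_dim_sl3 a (t - a) = PySem.Int.floordiv ((a + 1) * (t + 1 - a) * (t + 2)) 2 := by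
  unfold weyl_dim_sl3
  rw [if_neg (by omega)]
  congr 1; ring

theorem pv_min_d_eq (t : Int) (ht : 0 ≤ t) :
    weyl_dim_sl3 t 0 = PySem.Int.floordiv ((t + 1) * (t + 2)) 2 := by
  unfold weyl_dim_sl3
  rw [if_neg (by omega)]
  congr 1; ring

-- d ≤ max_dim  ↔  (a+1)(t+1-a) ≤ M
theorem pv_valid_iff (md t a : Int) (ha : 0 ≤ a) (hat : a ≤ t) :
    weyl_dim_sl3 a (t - a) ≤ md ↔
      (a + 1) * (t + 1 - a) ≤ PySem.Int.floordiv (2 * md + 1) (t + 2) := by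
  rw [pv_weyl_eq t a ha hat,
      PySem.Int.le_floordiv_iff_mul_le (by omega : (0:Int) < t + 2),
      PySem.Int.floordiv_eq_ediv_of_pos (by omega : (0:Int) < 2)]
  omega

-- the scan pvBFindL returns the length of the valid prefix of [1, half]
theorem pv_findL_spec (t M half : Int) (L0 : Int) (h0 : 0 ≤ L0) (hh : L0 ≤ half)
    (hv : L0 = 0 ∨ L0 * (t + 2 - L0) ≤ M) :
    0 ≤ pvBFindL t M half L0 ∧ pvBFindL t M half L0 ≤ half ∧
      (pvBFindL t M half L0 = 0 ∨ pvBFindL t M half L0 * (t + 2 - pvBFindL t M half L0) ≤ M) ∧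
      (pvBFindL t M half L0 = half ∨
        M < (pvBFindL t M half L0 + 1) * (t + 1 - pvBFindL t M half L0)) := by
  revert h0 hh hv
  induction L0 using pvBFindL.induct t M half with
  | case1 L h ih =>
    intro h0 hh hv
    rw [pvBFindL, dif_pos h]
    exact ih (by omega) (by omega) (Or.inr (by nlinarith [h.2]))
  | case2 L h =>
    intro h0 hh hv
    rw [pvBFindL, dif_neg h]
    refine ⟨h0, hh, hv, ?_⟩
    by_cases hLh : L = half
    · exact Or.inl hLh
    · exact Or.inr (by omega)

-- core arithmetic: valid a are exactly the two end-intervals determined by L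
theorem pv_core (t M a L half : Int) (ht : 1 ≤ t) (ha : 0 ≤ a) (hat : a ≤ t)
    (hhalf : 2 * half ≤ t + 2 ∧ t + 2 ≤ 2 * half + 1)
    (hL0 : 0 ≤ L) (hLh : L ≤ half)
    (hLv : L = 0 ∨ L * (t + 2 - L) ≤ M)
    (hLs : L = half ∨ M < (L + 1) * (t + 1 - L)) :
    (a + 1) * (t + 1 - a) ≤ M ↔ (a < L ∨ max L (t + 1 - L) ≤ a) := by
  constructor
  · intro hv
    by_contra hcon
    rw [not_or, not_lt, not_le] at hcon
    obtain ⟨h1, h2⟩ := hcon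
    have hmax : L ≤ t + 1 - L := by omega
    rw [max_eq_right hmax] at h2
    -- L ≤ a ≤ t - L, so L < half and f(L+1) > M, while f(a+1) ≥ f(L+1)
    have hLlt : L < half := by omega
    have hMlt : M < (L + 1) * (t + 1 - L) := by
      rcases hLs with h | h
      · omega
      · exact h
    have hge : (L + 1) * (t + 1 - L) ≤ (a + 1) * (t + 1 - a) := by
      by_cases hmid : 2 * (a + 1) ≤ t + 2
      · have := pv_f_mono t (L + 1) (a + 1) (by omega) (by omega) (by omega)
        calc (L + 1) * (t + 1 - L) = (L + 1) * (t + 2 - (L + 1)) := by ring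
          _ ≤ (a + 1) * (t + 2 - (a + 1)) := this
          _ = (a + 1) * (t + 1 - a) := by ring
      · have := pv_f_mono t (L + 1) (t + 1 - a) (by omega) (by omega) (by omega)
        calc (L + 1) * (t + 1 - L) = (L + 1) * (t + 2 - (L + 1)) := by ring
          _ ≤ (t + 1 - a) * (t + 2 - (t + 1 - a)) := this
          _ = (a + 1) * (t + 1 - a) := by ring
    omega
  · intro hcase
    rcases hcase with hlt | hge
    · -- a < L : f(a+1) ≤ f(L) ≤ M
      have hLv' : L * (t + 2 - L) ≤ M := by
        rcases hLv with h | h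
        · omega
        · exact h
      have := pv_f_mono t (a + 1) L (by omega) (by omega) (by omega)
      calc (a + 1) * (t + 1 - a) = (a + 1) * (t + 2 - (a + 1)) := by ring
        _ ≤ L * (t + 2 - L) := this
        _ ≤ M := hLv'
    · -- max L (t+1-L) ≤ a : mirror x' = t+1-a ≤ L
      have hL1 : t + 1 - L ≤ a := le_trans (le_max_right _ _) hge
      have hL2 : L ≤ a := le_trans (le_max_left _ _) hge
      have hLpos : 1 ≤ L := by omega
      have hLv' : L * (t + 2 - L) ≤ M := by
        rcases hLv with h | h
        · omega
        · exact h
      have := pv_f_mono t (t + 1 - a) L (by omega) (by omega) (by omega)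
      calc (a + 1) * (t + 1 - a) = (t + 1 - a) * (t + 2 - (t + 1 - a)) := by ring
        _ ≤ L * (t + 2 - L) := this
        _ ≤ M := hLv'

-- A's inner fold, split into its two independent accumulators
theorem pv_A_fold (md t : Int) (l : List Int) :
    ∀ (c : PySem.Dict Int Int) (fl : Bool),
      l.foldl (pvAInner md t) (c, fl) =
        ((l.filter (fun a => decide (weyl_dim_sl3 a (t - a) ≤ md))).foldl
            (fun cc a =>
              cc.insert (weyl_dim_sl3 a (t - a)) (cc.getD (weyl_dim_sl3 a (t - a)) 0 + 1)) c,
          fl || l.any (fun a => decide (weyl_dim_sl3 a (t - a) ≤ md))) := by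
  induction l with
  | nil => intro c fl; simp
  | cons x xs ih =>
    intro c fl
    simp only [List.foldl_cons, List.filter_cons, List.any_cons, pvAInner]
    by_cases hx : weyl_dim_sl3 x (t - x) ≤ md
    · simp [hx, ih]
    · simp [hx, ih]

-- when min_d > max_dim no a at this total is valid
theorem pv_no_valid (md t a : Int) (ht : 1 ≤ t) (ha : 0 ≤ a) (hat : a ≤ t)
    (h : md < weyl_dim_sl3 t 0) : ¬ weyl_dim_sl3 a (t - a) ≤ md := by
  intro hv
  rw [pv_valid_iff md t a ha hat] at hv
  rw [pv_min_d_eq t (by omega)] at h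
  rw [PySem.Int.le_floordiv_iff_mul_le (by omega : (0:Int) < t + 2)] at hv
  have hmin := pv_f_min t a ha hat
  have : (t + 1) * (t + 2) ≤ (a + 1) * (t + 1 - a) * (t + 2) := by nlinarith
  rw [PySem.Int.floordiv_eq_ediv_of_pos (by omega : (0:Int) < 2)] at h
  omega

-- when min_d ≤ max_dim, a = 0 is valid
theorem pv_zero_valid (md t : Int) (ht : 1 ≤ t) (h : weyl_dim_sl3 t 0 ≤ md) :
    weyl_dim_sl3 0 (t - 0) ≤ md := by
  rw [pv_valid_iff md t 0 (by omega) (by omega),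
      PySem.Int.le_floordiv_iff_mul_le (by omega : (0:Int) < t + 2)]
  rw [pv_min_d_eq t (by omega),
      PySem.Int.floordiv_eq_ediv_of_pos (by omega : (0:Int) < 2)] at h
  have hprod : (0 + 1) * (t + 1 - 0) * (t + 2) = (t + 1) * (t + 2) := by ring
  omega

-- the filter over the full range is exactly the two end ranges of B
theorem pv_filter_eq (md t : Int) (ht : 1 ≤ t) :
    (PySem.List.pyRange 0 (t + 1) 1).filter
        (fun a => decide (weyl_dim_sl3 a (t - a) ≤ md)) =
      PySem.List.pyRange 0 (pvBFindL t (PySem.Int.floordiv (2 * md + 1) (t + 2))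
          (PySem.Int.floordiv (t + 2) 2) 0) 1 ++
      PySem.List.pyRange
        (max (pvBFindL t (PySem.Int.floordiv (2 * md + 1) (t + 2))
            (PySem.Int.floordiv (t + 2) 2) 0)
          (t + 1 - pvBFindL t (PySem.Int.floordiv (2 * md + 1) (t + 2))
            (PySem.Int.floordiv (t + 2) 2) 0))
        (t + 1) 1 := by
  set M := PySem.Int.floordiv (2 * md + 1) (t + 2) with hM
  set half := PySem.Int.floordiv (t + 2) 2 with hhalfdef
  set L := pvBFindL t M half 0 with hLdef
  have hhalf : 2 * half ≤ t + 2 ∧ t + 2 ≤ 2 * half + 1 := by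
    rw [hhalfdef, PySem.Int.floordiv_eq_ediv_of_pos (by omega : (0:Int) < 2)]
    omega
  obtain ⟨hL0, hLh, hLv, hLs⟩ :=
    pv_findL_spec t M half 0 (by omega) (by omega) (Or.inl rfl)
  refine List.Perm.eq_of_pairwise (le := (· ≤ · : Int → Int → Prop))
    (fun a b _ _ h1 h2 => le_antisymm h1 h2) ?_ ?_ ?_
  · exact List.Pairwise.filter _
      (List.Pairwise.imp (fun h => le_of_lt h) (PySem.List.pairwise_lt_pyRange_one _ _))
  · rw [List.pairwise_append]
    refine ⟨List.Pairwise.imp (fun h => le_of_lt h) (PySem.List.pairwise_lt_pyRange_one _ _),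
      List.Pairwise.imp (fun h => le_of_lt h) (PySem.List.pairwise_lt_pyRange_one _ _), ?_⟩
    intro a h1 b h2
    rw [PySem.List.mem_pyRange_one] at h1 h2
    have := le_max_left L (t + 1 - L)
    omega
  · rw [List.perm_ext_iff_of_nodup
      (List.Nodup.filter _ (PySem.List.nodup_pyRange_one _ _))
      (List.Nodup.append (PySem.List.nodup_pyRange_one _ _) (PySem.List.nodup_pyRange_one _ _)
        (by
          intro a h1 h2
          rw [PySem.List.mem_pyRange_one] at h1 h2
          have := le_max_left L (t + 1 - L)
          omega))]
    intro a
    rw [List.mem_filter, List.mem_append, PySem.List.mem_pyRange_one,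
        PySem.List.mem_pyRange_one, PySem.List.mem_pyRange_one, decide_eq_true_eq]
    constructor
    · rintro ⟨⟨ha, hat⟩, hv⟩
      rw [pv_valid_iff md t a ha (by omega)] at hv
      rcases (pv_core t M a L half ht ha (by omega) hhalf hL0 hLh hLv hLs).mp hv with h | h
      · exact Or.inl ⟨ha, h⟩
      · exact Or.inr ⟨h, hat⟩
    · intro h
      have hb : 0 ≤ a ∧ a < t + 1 := by
        rcases h with ⟨ha, hl⟩ | ⟨hge, hlt⟩
        · omega
        · have h1 := le_trans (le_max_left L (t + 1 - L)) hge
          omega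
      refine ⟨hb, ?_⟩
      rw [pv_valid_iff md t a hb.1 (by omega)]
      apply (pv_core t M a L half ht hb.1 (by omega) hhalf hL0 hLh hLv hLs).mpr
      rcases h with ⟨ha, hl⟩ | ⟨hge, hlt⟩
      · exact Or.inl hl
      · exact Or.inr hge

-- the dict step of A equals the dict step of B on members of the range
theorem pv_step_congr (md t : Int) (l : List Int)
    (hl : ∀ a ∈ l, 0 ≤ a ∧ a ≤ t) (c : PySem.Dict Int Int) :
    l.foldl (fun cc a =>
        cc.insert (weyl_dim_sl3 a (t - a)) (cc.getD (weyl_dim_sl3 a (t - a)) 0 + 1)) c =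
      l.foldl (pvBStep t) c := by
  apply PySem.List.foldl_congr_mem
  intro acc a ha
  obtain ⟨h1, h2⟩ := hl a ha
  rw [pv_weyl_eq t a h1 h2]
  rfl

-- outer loops agree, by induction on the number of remaining totals
theorem pv_outer (md mt : Int) : ∀ (n : Nat) (k : Int) (c : PySem.Dict Int Int),
    (mt + 1 - k).toNat = n → 1 ≤ k →
    pvALoop md mt k c = pvBLoop md mt k c := by
  intro n
  induction n with
  | zero =>
    intro k c hn hk
    rw [pvALoop, if_neg (by omega), pvBLoop, if_neg (by omega)]
  | succ n ih =>
    intro k c hn hk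
    have hkm : k ≤ mt := by omega
    rw [pvALoop, if_pos hkm]
    show (let st := (PySem.List.pyRange 0 (k + 1) 1).foldl (pvAInner md k) (c, false);
      if weyl_dim_sl3 k 0 > md ∧ st.2 = false then st.1
      else pvALoop md mt (k + 1) st.1) = pvBLoop md mt k c
    rw [pv_A_fold md k _ c false]
    by_cases hmd : weyl_dim_sl3 k 0 ≤ md
    · -- continue: min_d ≤ max_dim, flag true, both loops do the work and recurse
      have hany : (PySem.List.pyRange 0 (k + 1) 1).any
          (fun a => decide (weyl_dim_sl3 a (k - a) ≤ md)) = true := by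
        rw [List.any_eq_true]
        exact ⟨0, by rw [PySem.List.mem_pyRange_one]; omega,
          by simpa using pv_zero_valid md k hk hmd⟩
      rw [hany]
      simp only [Bool.false_or]
      rw [if_neg (by simp)]
      rw [pvBLoop, if_pos ⟨hkm, by rw [← pv_min_d_eq k (by omega)]; exact hmd⟩]
      rw [← ih (k + 1) _ (by omega) (by omega)]
      congr 1
      have hhb : 2 * PySem.Int.floordiv (k + 2) 2 ≤ k + 2 ∧
          k + 2 ≤ 2 * PySem.Int.floordiv (k + 2) 2 + 1 := by
        rw [PySem.Int.floordiv_eq_ediv_of_pos (by omega : (0:Int) < 2)]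
        omega
      have hs := pv_findL_spec k (PySem.Int.floordiv (2 * md + 1) (k + 2))
        (PySem.Int.floordiv (k + 2) 2) 0 le_rfl (by omega) (Or.inl rfl)
      rw [pv_filter_eq md k hk, List.foldl_append]
      -- the first rewrite hits the outer fold (second interval), the second the inner one
      rw [pv_step_congr md k _ (by
            intro a ha
            rw [PySem.List.mem_pyRange_one] at ha
            have h1 := le_trans (le_max_left _ (k + 1 - pvBFindL k
              (PySem.Int.floordiv (2 * md + 1) (k + 2))
              (PySem.Int.floordiv (k + 2) 2) 0)) ha.1
            omega)]
      rw [pv_step_congr md k _ (by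
            intro a ha
            rw [PySem.List.mem_pyRange_one] at ha
            omega)]
    · -- stop: min_d > max_dim, nothing valid, A breaks with unchanged dict, B's guard fails
      have hnone : ∀ a ∈ PySem.List.pyRange 0 (k + 1) 1,
          ¬ weyl_dim_sl3 a (k - a) ≤ md := by
        intro a ha
        rw [PySem.List.mem_pyRange_one] at ha
        exact pv_no_valid md k a hk ha.1 (by omega) (by omega)
      have hfil : (PySem.List.pyRange 0 (k + 1) 1).filter
          (fun a => decide (weyl_dim_sl3 a (k - a) ≤ md)) = [] := by
        rw [List.filter_eq_nil_iff]
        intro a ha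
        simpa using hnone a ha
      have hany : (PySem.List.pyRange 0 (k + 1) 1).any
          (fun a => decide (weyl_dim_sl3 a (k - a) ≤ md)) = false := by
        rw [List.any_eq_false]
        intro a ha
        simpa using hnone a ha
      rw [hany, hfil]
      simp only [Bool.false_or, List.foldl_nil]
      rw [if_pos ⟨by omega, by trivial⟩]
      rw [pvBLoop, if_neg (by
        rw [← pv_min_d_eq k (by omega)]
        omega)]

-- ===== VERDICT (by name: the statement is the Claim_ definition above) =====
theorem dirichlet_coefficients_sl3_spec : Claim_equal_dirichlet_coefficients_sl3 := by
  intro md mt _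
  unfold Spec_dirichlet_coefficients_sl3 dirichlet_coefficients_sl3 dirichlet_coefficients_sl3_alt
  rw [pv_outer md mt (mt + 1 - 1).toNat 1 _ rfl (by omega)]
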